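-- pv_equiv track=rewrite | github.com/rbtkhn/grace-mar | scripts/work_jiang/channel_video_lookup.py | _pick_best_duplicate
-- ===== SOURCE A (Python) =====
-- def _pick_best_duplicate(candidates: list[tuple[str, str]]) -> tuple[str, str]:
--     """When multiple rows match one episode (e.g. re-upload), prefer AUDIO FIXED / Re-upload."""
--     if len(candidates) == 1:
--         return candidates[0]
--     for pref in ("AUDIO FIXED", "Re-upload", "Re-Upload"):
--         for vid, title in candidates:
--             if pref in title:
--                 return (vid, title)
--     return candidates[0]
-- ===== SOURCE B (Python) =====
-- def _pick_best_duplicate(candidates: list[tuple[str, str]]) -> tuple[str, str]: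
--     """Single pass: keep the candidate with the lowest preference rank (first-seen wins ties)."""
--     def rank(title: str) -> int:
--         if "AUDIO FIXED" in title:
--             return 0
--         if "Re-upload" in title:
--             return 1
--         if "Re-Upload" in title:
--             return 2
--         return 3
--     best = candidates[0]
--     best_rank = rank(best[1])
--     for cand in candidates[1:]:
--         r = rank(cand[1])
--         if r < best_rank:
--             best, best_rank = cand, r
--     return best
-- ===== Notes on version B (the rewrite author's own statement) =====
-- stated objective: simpler
-- what changed: Replaced the two nested passes (preference-by-preference rescans plus a len==1 special case) with one pass that keeps the first candidate of minimal preference rank.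
import Mathlib
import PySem

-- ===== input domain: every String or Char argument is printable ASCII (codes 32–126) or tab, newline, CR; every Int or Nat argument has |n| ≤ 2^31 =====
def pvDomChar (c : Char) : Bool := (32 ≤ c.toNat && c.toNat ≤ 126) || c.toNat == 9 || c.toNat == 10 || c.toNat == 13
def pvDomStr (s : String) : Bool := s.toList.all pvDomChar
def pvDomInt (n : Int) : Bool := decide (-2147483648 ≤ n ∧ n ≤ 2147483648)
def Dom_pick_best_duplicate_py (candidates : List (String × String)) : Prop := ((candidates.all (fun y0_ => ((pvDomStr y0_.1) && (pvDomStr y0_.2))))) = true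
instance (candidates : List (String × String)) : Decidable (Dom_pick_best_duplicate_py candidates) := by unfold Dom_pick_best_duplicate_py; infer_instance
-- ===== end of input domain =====

-- B replaces A's preference-by-preference rescans with a single pass keeping the first
-- candidate of minimal preference rank (objective: simpler). Both raise IndexError on [].


-- ===== PORT A =====
-- inner 'for vid, title in candidates' of A, for one pref
def pbdFind (pref : String) : List (String × String) → Option (String × String)
  | [] => none
  | (vid, title) :: rest =>
      if PySem.Str.isIn pref title then some (vid, title) else pbdFind pref rest

def pick_best_duplicate_py (candidates : List (String × String)) : String × String :=
  if candidates.length = 1 then candidates.headD ("", "")   -- candidates[0]; [] raises (outside Pre_)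
  else
    -- 'for pref in ("AUDIO FIXED", "Re-upload", "Re-Upload")' unrolled over the 3 literals
    match pbdFind "AUDIO FIXED" candidates with
    | some p => p
    | none =>
      match pbdFind "Re-upload" candidates with
      | some p => p
      | none =>
        match pbdFind "Re-Upload" candidates with
        | some p => p
        | none => candidates.headD ("", "")                 -- candidates[0]

-- ===== PORT B =====
def pbdRank (title : String) : Nat :=
  if PySem.Str.isIn "AUDIO FIXED" title then 0
  else if PySem.Str.isIn "Re-upload" title then 1
  else if PySem.Str.isIn "Re-Upload" title then 2
  else 3

-- 'for cand in candidates[1:]' with state (best, best_rank)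
def pbdLoop : List (String × String) → (String × String) → Nat → String × String
  | [], best, _ => best
  | cand :: rest, best, bestRank =>
      let r := pbdRank cand.2
      if r < bestRank then pbdLoop rest cand r else pbdLoop rest best bestRank

def pick_best_duplicate_py_alt (candidates : List (String × String)) : String × String :=
  match candidates with
  | [] => ("", "")                                          -- candidates[0] raises (outside Pre_)
  | best :: rest => pbdLoop rest best (pbdRank best.2)

-- ===== PRECONDITION & SPEC =====
-- Pre_ excludes only the empty list, on which A's candidates[0] raises IndexError.
def Pre_pick_best_duplicate_py (candidates : List (String × String)) : Prop := candidates ≠ []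
instance (candidates : List (String × String)) : Decidable (Pre_pick_best_duplicate_py candidates) := by unfold Pre_pick_best_duplicate_py; infer_instance
def pvWitness_pick_best_duplicate_py : (List (String × String)) := [("v1", "ep 1"), ("v2", "ep 1 AUDIO FIXED")]
def Spec_pick_best_duplicate_py (candidates : List (String × String)) (out : String × String) : Prop := out = pick_best_duplicate_py_alt candidates
instance (candidates : List (String × String)) (out : String × String) : Decidable (Spec_pick_best_duplicate_py candidates out) := by unfold Spec_pick_best_duplicate_py; infer_instance

-- ===== CLAIM (what is proved, stated in full; the proofs are below) =====
def Claim_equal_pick_best_duplicate_py : Prop := ∀ (candidates : List (String × String)), Dom_pick_best_duplicate_py candidates → Pre_pick_best_duplicate_py candidates → Spec_pick_best_duplicate_py candidates (pick_best_duplicate_py candidates)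

-- ===== LEMMAS AND PROOFS =====

-- first element of rank exactly i
def pbdE (i : Nat) : List (String × String) → Option (String × String)
  | [] => none
  | x :: xs => if pbdRank x.2 = i then some x else pbdE i xs

-- first of o1, o2, o3, else b
def pbdChoose (o1 o2 o3 : Option (String × String)) (b : String × String) : String × String :=
  match o1 with
  | some y => y
  | none => match o2 with
    | some y => y
    | none => match o3 with
      | some y => y
      | none => b

theorem pbdRank_le (t : String) : pbdRank t ≤ 3 := by
  unfold pbdRank; split_ifs <;> norm_num

theorem pbdRank_eq_zero_iff (t : String) :
    pbdRank t = 0 ↔ PySem.Str.isIn "AUDIO FIXED" t = true := by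
  unfold pbdRank; split_ifs with h1 h2 h3 <;> simp_all

theorem pbdRank_eq_one_iff (t : String) :
    pbdRank t = 1 ↔
      (PySem.Str.isIn "AUDIO FIXED" t = false ∧ PySem.Str.isIn "Re-upload" t = true) := by
  unfold pbdRank; split_ifs with h1 h2 h3 <;> simp_all

theorem pbdRank_eq_two_iff (t : String) :
    pbdRank t = 2 ↔
      (PySem.Str.isIn "AUDIO FIXED" t = false ∧ PySem.Str.isIn "Re-upload" t = false ∧
        PySem.Str.isIn "Re-Upload" t = true) := by
  unfold pbdRank; split_ifs with h1 h2 h3 <;> simp_all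

theorem pbdFind0_eq (cs : List (String × String)) : pbdFind "AUDIO FIXED" cs = pbdE 0 cs := by
  induction cs with
  | nil => rfl
  | cons x xs ih =>
      obtain ⟨v, t⟩ := x
      simp only [pbdFind, pbdE]
      by_cases h : PySem.Str.isIn "AUDIO FIXED" t = true
      · rw [if_pos h, if_pos ((pbdRank_eq_zero_iff t).mpr h)]
      · rw [if_neg h, if_neg (fun hc => h ((pbdRank_eq_zero_iff t).mp hc))]
        exact ih

theorem pbdFind1_eq (cs : List (String × String)) (h0 : pbdE 0 cs = none) :
    pbdFind "Re-upload" cs = pbdE 1 cs := by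
  induction cs with
  | nil => rfl
  | cons x xs ih =>
      obtain ⟨v, t⟩ := x
      simp only [pbdE] at h0
      by_cases ha : pbdRank t = 0
      · rw [if_pos ha] at h0; exact absurd h0 (by simp)
      · rw [if_neg ha] at h0
        have hna : PySem.Str.isIn "AUDIO FIXED" t = false := by
          cases hb : PySem.Str.isIn "AUDIO FIXED" t
          · rfl
          · exact absurd ((pbdRank_eq_zero_iff t).mpr hb) ha
        simp only [pbdFind, pbdE]
        by_cases hb : PySem.Str.isIn "Re-upload" t = true
        · rw [if_pos hb, if_pos ((pbdRank_eq_one_iff t).mpr ⟨hna, hb⟩)]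
        · rw [if_neg hb, if_neg (fun hc => hb ((pbdRank_eq_one_iff t).mp hc).2)]
          exact ih h0

theorem pbdFind2_eq (cs : List (String × String)) (h0 : pbdE 0 cs = none)
    (h1 : pbdE 1 cs = none) : pbdFind "Re-Upload" cs = pbdE 2 cs := by
  induction cs with
  | nil => rfl
  | cons x xs ih =>
      obtain ⟨v, t⟩ := x
      simp only [pbdE] at h0 h1
      by_cases ha : pbdRank t = 0
      · rw [if_pos ha] at h0; exact absurd h0 (by simp)
      · rw [if_neg ha] at h0
        by_cases hb : pbdRank t = 1
        · rw [if_pos hb] at h1; exact absurd h1 (by simp)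
        · rw [if_neg hb] at h1
          have hna : PySem.Str.isIn "AUDIO FIXED" t = false := by
            cases hh : PySem.Str.isIn "AUDIO FIXED" t
            · rfl
            · exact absurd ((pbdRank_eq_zero_iff t).mpr hh) ha
          have hnb : PySem.Str.isIn "Re-upload" t = false := by
            cases hh : PySem.Str.isIn "Re-upload" t
            · rfl
            · exact absurd ((pbdRank_eq_one_iff t).mpr ⟨hna, hh⟩) hb
          simp only [pbdFind, pbdE]
          by_cases hc : PySem.Str.isIn "Re-Upload" t = true
          · rw [if_pos hc, if_pos ((pbdRank_eq_two_iff t).mpr ⟨hna, hnb, hc⟩)]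
          · rw [if_neg hc, if_neg (fun hh => hc ((pbdRank_eq_two_iff t).mp hh).2.2)]
            exact ih h0 h1

-- characterization of B's loop: first element with minimal rank below bestRank, else best
theorem pbdLoop_char (cs : List (String × String)) (b : String × String) (r : Nat) (hr : r ≤ 3) :
    pbdLoop cs b r =
      pbdChoose (if 0 < r then pbdE 0 cs else none) (if 1 < r then pbdE 1 cs else none)
        (if 2 < r then pbdE 2 cs else none) b := by
  induction cs generalizing b r with
  | nil =>
      simp only [pbdLoop, pbdE]
      split_ifs <;> rfl
  | cons x xs ih =>
      have hx := pbdRank_le x.2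
      simp only [pbdLoop]
      by_cases h : pbdRank x.2 < r
      · rw [if_pos h, ih x (pbdRank x.2) hx]
        have hk : pbdRank x.2 = 0 ∨ pbdRank x.2 = 1 ∨ pbdRank x.2 = 2 := by omega
        rcases hk with hk | hk | hk
        · have h0r : 0 < r := by omega
          simp only [hk, pbdE, h0r, if_pos]
          norm_num [pbdChoose]
        · have h0r : 0 < r := by omega
          have h1r : 1 < r := by omega
          simp only [hk, pbdE, h0r, h1r, if_true]
          norm_num [pbdChoose]
        · have h0r : 0 < r := by omega
          have h1r : 1 < r := by omega
          have h2r : 2 < r := by omega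
          simp only [hk, pbdE, h0r, h1r, h2r, if_true]
          norm_num [pbdChoose]
      · rw [if_neg h, ih b r hr]
        have e0 : (if 0 < r then pbdE 0 (x :: xs) else none) = (if 0 < r then pbdE 0 xs else none) := by
          split_ifs with hh
          · simp only [pbdE]; rw [if_neg (by omega : pbdRank x.2 ≠ 0)]
          · rfl
        have e1 : (if 1 < r then pbdE 1 (x :: xs) else none) = (if 1 < r then pbdE 1 xs else none) := by
          split_ifs with hh
          · simp only [pbdE]; rw [if_neg (by omega : pbdRank x.2 ≠ 1)]
          · rfl
        have e2 : (if 2 < r then pbdE 2 (x :: xs) else none) = (if 2 < r then pbdE 2 xs else none) := by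
          split_ifs with hh
          · simp only [pbdE]; rw [if_neg (by omega : pbdRank x.2 ≠ 2)]
          · rfl
        rw [e0, e1, e2]

theorem pick_best_duplicate_eq (candidates : List (String × String))
    (hne : candidates ≠ []) :
    pick_best_duplicate_py candidates = pick_best_duplicate_py_alt candidates := by
  obtain ⟨c, rest, rfl⟩ : ∃ c rest, candidates = c :: rest := by
    cases candidates with
    | nil => exact absurd rfl hne
    | cons c rest => exact ⟨c, rest, rfl⟩
  have hrc := pbdRank_le c.2
  have halt : pick_best_duplicate_py_alt (c :: rest) =
      pbdChoose (if 0 < pbdRank c.2 then pbdE 0 rest else none)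
        (if 1 < pbdRank c.2 then pbdE 1 rest else none)
        (if 2 < pbdRank c.2 then pbdE 2 rest else none) c := by
    simp only [pick_best_duplicate_py_alt]
    exact pbdLoop_char rest c (pbdRank c.2) hrc
  by_cases hlen : (c :: rest).length = 1
  · have hrest : rest = [] := by
      cases rest with
      | nil => rfl
      | cons _ _ => simp at hlen
    subst hrest
    rw [halt]
    simp only [pick_best_duplicate_py, if_pos hlen, pbdE, List.headD]
    split_ifs <;> rfl
  · rw [halt]
    simp only [pick_best_duplicate_py, if_neg hlen]
    rw [pbdFind0_eq]
    have hk : pbdRank c.2 = 0 ∨ pbdRank c.2 = 1 ∨ pbdRank c.2 = 2 ∨ pbdRank c.2 = 3 := by omega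
    rcases hk with hk | hk | hk | hk
    · have : pbdE 0 (c :: rest) = some c := by simp [pbdE, hk]
      simp [this, hk, pbdChoose]
    · have he0 : pbdE 0 (c :: rest) = pbdE 0 rest := by simp [pbdE, hk]
      rw [he0]
      cases h0 : pbdE 0 rest with
      | some y => simp [pbdChoose, hk]
      | none =>
          rw [pbdFind1_eq _ (by rw [he0, h0])]
          have : pbdE 1 (c :: rest) = some c := by simp [pbdE, hk]
          simp [this, hk, pbdChoose]
    · have he0 : pbdE 0 (c :: rest) = pbdE 0 rest := by simp [pbdE, hk]
      rw [he0]
      cases h0 : pbdE 0 rest with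
      | some y => simp [pbdChoose, hk]
      | none =>
          rw [pbdFind1_eq _ (by rw [he0, h0])]
          have he1 : pbdE 1 (c :: rest) = pbdE 1 rest := by simp [pbdE, hk]
          rw [he1]
          cases h1 : pbdE 1 rest with
          | some y => simp [pbdChoose, hk]
          | none =>
              rw [pbdFind2_eq _ (by rw [he0, h0]) (by rw [he1, h1])]
              have : pbdE 2 (c :: rest) = some c := by simp [pbdE, hk]
              simp [this, hk, pbdChoose]
    · have he0 : pbdE 0 (c :: rest) = pbdE 0 rest := by simp [pbdE, hk]
      rw [he0]
      cases h0 : pbdE 0 rest with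
      | some y => simp [pbdChoose, hk]
      | none =>
          rw [pbdFind1_eq _ (by rw [he0, h0])]
          have he1 : pbdE 1 (c :: rest) = pbdE 1 rest := by simp [pbdE, hk]
          rw [he1]
          cases h1 : pbdE 1 rest with
          | some y => simp [pbdChoose, hk]
          | none =>
              rw [pbdFind2_eq _ (by rw [he0, h0]) (by rw [he1, h1])]
              have he2 : pbdE 2 (c :: rest) = pbdE 2 rest := by simp [pbdE, hk]
              rw [he2]
              cases h2 : pbdE 2 rest <;> simp [pbdChoose, hk, List.headD]

-- ===== VERDICT (by name: the statement is the Claim_ definition above) =====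
theorem pick_best_duplicate_py_spec : Claim_equal_pick_best_duplicate_py := by
  intro candidates _ hpre
  unfold Spec_pick_best_duplicate_py
  exact pick_best_duplicate_eq candidates hpre
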